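-- pv_equiv track=rewrite | github.com/duyvu1110/E2E | utils/data.py | get_token_span
-- ===== SOURCE A (Python) =====
-- def get_token_span(word_idx, tok_to_orig_index):
--     #  word_idx: 是text按空格划分之后的word,分词之后对应的index, 传入的是offset的数字， 加1？
--     """
--     功能: 根据word索引得到token的span (start, end), 若先将'[unused1]'加入text,此处可以直接用sub_offset
--     """
--     start , end = -1, -1
--     for idx, i in enumerate(tok_to_orig_index):
--         if i == word_idx:
--             if start == -1:
--                 start = idx
--             end = idx
--     return start , end #
-- ===== SOURCE B (Python) =====
-- def get_token_span(word_idx, tok_to_orig_index):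
--     """Two opposite-direction bounded searches: first match forward, last match backward."""
--     start = -1
--     for idx, i in enumerate(tok_to_orig_index):
--         if i == word_idx:
--             start = idx
--             break
--     if start == -1:
--         return -1, -1
--     for back, i in enumerate(reversed(tok_to_orig_index)):
--         if i == word_idx:
--             return start, len(tok_to_orig_index) - 1 - back
-- ===== Notes on version B (the rewrite author's own statement) =====
-- stated objective: alternative
-- what changed: Replaces the single accumulating full pass with two early-exit searches: a forward scan for the first matching index and a backward scan over the reversed sequence for the last, each stopping at its first hit.
import Mathlib
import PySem

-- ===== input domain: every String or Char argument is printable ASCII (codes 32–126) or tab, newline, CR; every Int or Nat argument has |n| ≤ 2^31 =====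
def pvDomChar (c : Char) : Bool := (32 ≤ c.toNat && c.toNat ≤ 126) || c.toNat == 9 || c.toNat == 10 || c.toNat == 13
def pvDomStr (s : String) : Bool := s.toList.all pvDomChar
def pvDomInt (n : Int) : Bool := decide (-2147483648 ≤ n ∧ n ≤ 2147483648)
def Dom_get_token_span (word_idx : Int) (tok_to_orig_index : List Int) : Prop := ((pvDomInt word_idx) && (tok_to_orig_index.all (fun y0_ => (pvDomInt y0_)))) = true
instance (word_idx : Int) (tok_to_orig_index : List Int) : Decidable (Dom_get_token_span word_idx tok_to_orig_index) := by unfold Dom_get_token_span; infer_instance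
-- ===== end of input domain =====

-- B replaces A's single accumulating pass with two early-exit searches (first match
-- forward, last match backward over the reversed list); same O(n) cost, different shape.
-- A returns a tuple (start, end); ported as a two-element list.

-- ===== PORT A =====
-- the loop body of A: update (start, end) at an enumerated element (idx, i)
def gtsStep (word_idx : Int) (s : Int × Int) (p : Int × Int) : Int × Int :=
  if p.2 == word_idx then (if s.1 == -1 then (p.1, p.1) else (s.1, p.1)) else s

def get_token_span (word_idx : Int) (tok_to_orig_index : List Int) : List Int :=
  let st := (PySem.List.enumerate tok_to_orig_index).foldl (gtsStep word_idx) (-1, -1)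
  [st.1, st.2]

-- ===== PORT B =====
-- forward early-exit scan: index (counted from k) of the first element equal to w
def gtsFwd (w : Int) : List Int → Int → Option Int
  | [], _ => none
  | x :: xs, k => if x == w then some k else gtsFwd w xs (k + 1)

def get_token_span_alt (word_idx : Int) (tok_to_orig_index : List Int) : List Int :=
  match gtsFwd word_idx tok_to_orig_index 0 with
  | none => [-1, -1]
  | some s =>
    match gtsFwd word_idx tok_to_orig_index.reverse 0 with
    | some b => [s, (tok_to_orig_index.length : Int) - 1 - b]
    | none => [s, -1]  -- unreachable: the backward scan finds w whenever the forward one did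

-- ===== PRECONDITION & SPEC =====
def Spec_get_token_span (word_idx : Int) (tok_to_orig_index : List Int) (out : List Int) : Prop := out = get_token_span_alt word_idx tok_to_orig_index
instance (word_idx : Int) (tok_to_orig_index : List Int) (out : List Int) : Decidable (Spec_get_token_span word_idx tok_to_orig_index out) := by unfold Spec_get_token_span; infer_instance

-- ===== CLAIM (what is proved, stated in full; the proofs are below) =====
def Claim_equal_get_token_span : Prop := ∀ (word_idx : Int) (tok_to_orig_index : List Int), Dom_get_token_span word_idx tok_to_orig_index → Spec_get_token_span word_idx tok_to_orig_index (get_token_span word_idx tok_to_orig_index)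

-- ===== LEMMAS AND PROOFS =====

theorem gtsFwd_eq_none_iff (w : Int) : ∀ (l : List Int) (k : Int),
    gtsFwd w l k = none ↔ w ∉ l := by
  intro l
  induction l with
  | nil => intro k; simp [gtsFwd]
  | cons x xs ih =>
    intro k
    by_cases h : x = w
    · simp [gtsFwd, h]
    · simp [gtsFwd, beq_iff_eq, h, ih, Ne.symm h]

theorem gtsFwd_le (w : Int) : ∀ (l : List Int) (k s : Int),
    gtsFwd w l k = some s → k ≤ s := by
  intro l
  induction l with
  | nil => intro k s h; simp [gtsFwd] at h
  | cons x xs ih =>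
    intro k s h
    by_cases hx : x = w
    · simp [gtsFwd, hx] at h; omega
    · simp [gtsFwd, beq_iff_eq, hx] at h
      have := ih (k + 1) s h
      omega

theorem gtsFwd_shift (w : Int) : ∀ (l : List Int) (k : Int),
    gtsFwd w l k = (gtsFwd w l 0).map (· + k) := by
  intro l
  induction l with
  | nil => intro k; simp [gtsFwd]
  | cons x xs ih =>
    intro k
    by_cases hx : x = w
    · simp [gtsFwd, hx]
    · simp only [gtsFwd, beq_iff_eq, hx, if_false]
      rw [ih (k + 1), ih (0 + 1)]
      cases h : gtsFwd w xs 0 <;> simp <;> ring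

theorem gtsFwd_append (w : Int) : ∀ (l : List Int) (k x : Int),
    gtsFwd w (l ++ [x]) k =
      (match gtsFwd w l k with
       | some s => some s
       | none => if x == w then some (k + l.length) else none) := by
  intro l
  induction l with
  | nil => intro k x; simp [gtsFwd]
  | cons y ys ih =>
    intro k x
    by_cases hy : y = w
    · simp [gtsFwd, hy]
    · simp only [List.cons_append, gtsFwd, beq_iff_eq, hy, if_false]
      rw [ih (k + 1) x]
      cases h : gtsFwd w ys (k + 1) with
      | some s => simp
      | none =>
        by_cases hxw : x = w
        · simp [hxw]; ring
        · simp [beq_iff_eq, hxw]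

theorem foldA_char (w : Int) : ∀ (xs : List Int),
    (PySem.List.enumerate xs).foldl (gtsStep w) (-1, -1) =
      (match gtsFwd w xs 0, gtsFwd w xs.reverse 0 with
       | some s, some b => (s, (xs.length : Int) - 1 - b)
       | _, _ => ((-1 : Int), (-1 : Int))) := by
  intro xs
  induction xs using List.reverseRecOn with
  | nil => simp [PySem.List.enumerate_nil, gtsFwd]
  | append_singleton xs x ih =>
    rw [PySem.List.enumerate_append, List.foldl_append, ih]
    have henum : PySem.List.enumerate [x] ((0 : Int) + xs.length) = [((xs.length : Int), x)] := by
      simp [PySem.List.enumerate_cons, PySem.List.enumerate_nil]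
    rw [henum]
    have happ := gtsFwd_append w xs 0 x
    cases h1 : gtsFwd w xs 0 with
    | none =>
      have hnm : w ∉ xs := (gtsFwd_eq_none_iff w xs 0).mp h1
      have h1r : gtsFwd w xs.reverse 0 = none := by
        rw [gtsFwd_eq_none_iff]; simpa using hnm
      rw [h1] at happ
      by_cases hx : x = w
      · have hfa : gtsFwd w (xs ++ [x]) 0 = some ((0 : Int) + xs.length) := by
          rw [happ]; simp [hx]
        have hrev : gtsFwd w (xs ++ [x]).reverse 0 = some 0 := by
          simp [gtsFwd, hx]
        rw [hfa, hrev]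
        simp [gtsStep, hx]
      · have hfa : gtsFwd w (xs ++ [x]) 0 = none := by
          rw [happ]; simp [beq_iff_eq, hx]
        have hrev : gtsFwd w (xs ++ [x]).reverse 0 = none := by
          rw [gtsFwd_eq_none_iff]; simp [hx, Ne.symm, hnm]
           
        rw [hfa]
        simp [gtsStep, beq_iff_eq, hx]
    | some s =>
      have hmem : w ∈ xs := by
        by_contra hc
        rw [← gtsFwd_eq_none_iff w xs 0] at hc
        rw [h1] at hc; simp at hc
      have hs0 : (0 : Int) ≤ s := gtsFwd_le w xs 0 s h1
      obtain ⟨b, h2⟩ : ∃ b, gtsFwd w xs.reverse 0 = some b := by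
        cases h2 : gtsFwd w xs.reverse 0 with
        | none =>
          exfalso
          rw [gtsFwd_eq_none_iff] at h2
          exact h2 (by simpa using hmem)
        | some b => exact ⟨b, rfl⟩
      rw [h1] at happ
      have hfa : gtsFwd w (xs ++ [x]) 0 = some s := by rw [happ]
      by_cases hx : x = w
      · have hrev : gtsFwd w (xs ++ [x]).reverse 0 = some 0 := by
          simp [gtsFwd, hx]
        rw [hfa, hrev, h2]
        have hne : (s == (-1 : Int)) = false := by simp [beq_iff_eq]; omega
        simp [gtsStep, hx, hne]
      · have hrev : gtsFwd w (xs ++ [x]).reverse 0 = some (b + 1) := by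
          simp only [List.reverse_append, List.reverse_singleton, List.singleton_append,
            gtsFwd, beq_iff_eq, hx, if_false]
          rw [gtsFwd_shift w xs.reverse (0 + 1), h2]
          simp
        rw [hfa, hrev, h2]
        simp [gtsStep, beq_iff_eq, hx]
        push_cast; ring

-- ===== VERDICT (by name: the statement is the Claim_ definition above) =====
theorem get_token_span_spec : Claim_equal_get_token_span := by
  intro w xs _
  unfold Spec_get_token_span get_token_span get_token_span_alt
  rw [foldA_char w xs]
  cases h1 : gtsFwd w xs 0 with
  | none =>
    have h1r : gtsFwd w xs.reverse 0 = none := by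
      rw [gtsFwd_eq_none_iff]
      rw [gtsFwd_eq_none_iff] at h1
      simpa using h1
    simp
  | some s =>
    have hmem : w ∈ xs := by
      by_contra hc
      rw [← gtsFwd_eq_none_iff w xs 0] at hc
      rw [h1] at hc; simp at hc
    obtain ⟨b, h2⟩ : ∃ b, gtsFwd w xs.reverse 0 = some b := by
      cases h2 : gtsFwd w xs.reverse 0 with
      | none =>
        exfalso
        rw [gtsFwd_eq_none_iff] at h2
        exact h2 (by simpa using hmem)
      | some b => exact ⟨b, rfl⟩
    simp [h2]
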